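-- pv_equiv track=rewrite | github.com/arif51003/python_ex | dictionary/fun_support/Baklashka.py | baklashka
-- ===== SOURCE A (Python) =====
-- def baklashka(n):
--     k=0
--     s=0
--     while n>0:
--         k+=n
--         yn=(n+s)//3
--         s=(n+s)%3
--         n=yn
--     return k
-- ===== SOURCE B (Python) =====
-- def baklashka(n):
--     if n <= 0:
--         return 0
--     return (3 * n - 2 + n % 2) // 2
-- ===== Notes on version B (the rewrite author's own statement) =====
-- stated objective: simpler
-- what changed: Replaced the repeated-division accumulation loop with a closed-form arithmetic expression (telescoping 2K = 3n - s_final, with s_final forced to 1 or 2 by parity).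
import Mathlib
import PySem

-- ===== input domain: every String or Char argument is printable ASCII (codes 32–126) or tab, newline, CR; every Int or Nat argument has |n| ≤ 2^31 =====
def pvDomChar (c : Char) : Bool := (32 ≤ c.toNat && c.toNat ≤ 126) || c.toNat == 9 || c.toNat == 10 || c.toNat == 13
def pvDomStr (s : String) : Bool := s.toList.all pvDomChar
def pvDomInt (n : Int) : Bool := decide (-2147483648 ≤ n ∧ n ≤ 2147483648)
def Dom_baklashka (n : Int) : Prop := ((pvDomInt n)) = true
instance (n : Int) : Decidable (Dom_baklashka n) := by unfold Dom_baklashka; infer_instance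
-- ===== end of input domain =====

-- B replaces A's repeated-division accumulation loop with a closed-form arithmetic
-- expression (objective: simpler; O(1) instead of the loop).

-- ===== PORT A =====
-- the while loop of A, state (n, k, s); the proof argument only records that s,
-- produced by `% 3`, stays in [0, 3) (needed for Lean's termination checker)
def baklashkaLoop (n k s : Int) (_hs : 0 ≤ s ∧ s < 3) : Int :=
  if _h : 0 < n then
    baklashkaLoop (PySem.Int.floordiv (n + s) 3) (k + n) (PySem.Int.mod (n + s) 3)
      (by rw [PySem.Int.mod_eq_emod_of_pos (by norm_num)]; omega)
  else k
termination_by (2 * n + s).toNat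
decreasing_by
  rw [PySem.Int.floordiv_eq_ediv_of_pos (by norm_num),
      PySem.Int.mod_eq_emod_of_pos (by norm_num)]
  omega

def baklashka (n : Int) : Int := baklashkaLoop n 0 0 ⟨by norm_num, by norm_num⟩

-- ===== PORT B =====
def baklashka_alt (n : Int) : Int :=
  if n ≤ 0 then 0
  else PySem.Int.floordiv (3 * n - 2 + PySem.Int.mod n 2) 2

-- ===== PRECONDITION & SPEC =====
def Spec_baklashka (n : Int) (out : Int) : Prop := out = baklashka_alt n
instance (n : Int) (out : Int) : Decidable (Spec_baklashka n out) := by unfold Spec_baklashka; infer_instance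

-- ===== CLAIM (what is proved, stated in full; the proofs are below) =====
def Claim_equal_baklashka : Prop := ∀ (n : Int), Dom_baklashka n → Spec_baklashka n (baklashka n)

-- ===== LEMMAS AND PROOFS =====

-- closed form of the loop: the leftover carry is 1 or 2 according to parity of n + s
theorem baklashkaLoop_eq (n k s : Int) (hs : 0 ≤ s ∧ s < 3) :
    baklashkaLoop n k s hs =
      k + (if n ≤ 0 then 0 else (3 * n + s - (if (n + s) % 2 = 1 then 1 else 2)) / 2) := by
  rw [baklashkaLoop]
  by_cases h : 0 < n
  · simp only [h, dif_pos]
    rw [baklashkaLoop_eq]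
    rw [PySem.Int.floordiv_eq_ediv_of_pos (by norm_num),
        PySem.Int.mod_eq_emod_of_pos (by norm_num)]
    split_ifs <;> omega
  · simp only [h, dif_neg, not_false_iff]
    split_ifs <;> omega
termination_by (2 * n + s).toNat
decreasing_by
  rw [PySem.Int.floordiv_eq_ediv_of_pos (by norm_num),
      PySem.Int.mod_eq_emod_of_pos (by norm_num)]
  omega

-- ===== VERDICT (by name: the statement is the Claim_ definition above) =====
theorem baklashka_spec : Claim_equal_baklashka := by
  intro n _
  unfold Spec_baklashka baklashka baklashka_alt
  rw [baklashkaLoop_eq]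
  rw [PySem.Int.floordiv_eq_ediv_of_pos (by norm_num),
      PySem.Int.mod_eq_emod_of_pos (by norm_num)]
  split_ifs <;> omega
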